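-- pv_equiv track=rewrite | github.com/Francopizzolante/Programacion-1 | programacion/pyton/Ejercicios de estructura for y cadenas de caracteres/7.py | es_lipograma
-- ===== SOURCE A (Python) =====
-- def es_lipograma(cadena):
--     cadena = cadena.lower()
--     alfabeto = 'abcdefghijklmnopqrstuvwxyz'
--     for letra in alfabeto:
--         if letra not in cadena:
--             if letra == sin:
--                 continue
--             else:
--                 return False
--
--     return True
--
-- sin = 'w'
-- ===== SOURCE B (Python) =====
-- def es_lipograma(cadena):
--     # One pass over the string: accumulate a 26-bit mask of seen letters,
--     # then check all bits except possibly 'w' (bit 22) are set.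
--     mask = 0
--     for ch in cadena.lower():
--         o = ord(ch)
--         if 97 <= o <= 122:
--             mask |= 1 << (o - 97)
--     return (mask | (1 << 22)) == (1 << 26) - 1
-- ===== Notes on version B (the rewrite author's own statement) =====
-- stated objective: alternative
-- what changed: Inverts the traversal: instead of A's loop over the 26 alphabet letters each scanning the whole string, B makes a single pass over the string accumulating a 26-bit presence bitmask and ends with one integer comparison (mask with the 'w' bit forced on vs the full mask).
import Mathlib
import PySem

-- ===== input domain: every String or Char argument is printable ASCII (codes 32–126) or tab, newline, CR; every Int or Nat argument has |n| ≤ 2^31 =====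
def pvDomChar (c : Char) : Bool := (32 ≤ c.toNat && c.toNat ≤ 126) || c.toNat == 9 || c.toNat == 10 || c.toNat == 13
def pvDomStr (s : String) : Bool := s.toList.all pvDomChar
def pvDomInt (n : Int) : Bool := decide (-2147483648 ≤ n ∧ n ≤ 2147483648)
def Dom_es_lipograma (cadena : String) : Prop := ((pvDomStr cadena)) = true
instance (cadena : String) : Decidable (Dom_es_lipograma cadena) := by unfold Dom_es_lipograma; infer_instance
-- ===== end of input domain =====

-- B inverts the traversal: a single pass over the string accumulating a 26-bit presence bitmask plus one final integer comparison, instead of A's per-alphabet-letter scans of the string (alternative).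


-- ===== PORT A =====
-- the 'for letra in alfabeto' loop with its early 'return False' and 'continue' on letra == sin ('w')
def esLipoLoop (cadena : String) : List Char → Bool
  | [] => true
  | letra :: rest =>
    if !(PySem.Str.isIn (String.ofList [letra]) cadena) then
      if letra == 'w' then esLipoLoop cadena rest
      else false
    else esLipoLoop cadena rest

def es_lipograma (cadena : String) : Bool :=
  let cadena := PySem.Str.lower cadena
  let alfabeto := "abcdefghijklmnopqrstuvwxyz"
  esLipoLoop cadena alfabeto.toList

-- ===== PORT B =====
-- one iteration of B's 'for ch in cadena.lower()' loop body: set bit (ord(ch) - 97) when ch is a lowercase letter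
def maskStep (m : Nat) (ch : Char) : Nat :=
  let o := ch.toNat
  if 97 ≤ o ∧ o ≤ 122 then m ||| (1 <<< (o - 97)) else m

def es_lipograma_alt (cadena : String) : Bool :=
  let mask := (PySem.Str.lower cadena).toList.foldl maskStep 0
  (mask ||| (1 <<< 22)) == (1 <<< 26) - 1

-- ===== PRECONDITION & SPEC =====
def Spec_es_lipograma (cadena : String) (out : Bool) : Prop := out = es_lipograma_alt cadena
instance (cadena : String) (out : Bool) : Decidable (Spec_es_lipograma cadena out) := by unfold Spec_es_lipograma; infer_instance

-- ===== CLAIM (what is proved, stated in full; the proofs are below) =====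
def Claim_equal_es_lipograma : Prop := ∀ (cadena : String), Dom_es_lipograma cadena → Spec_es_lipograma cadena (es_lipograma cadena)

-- ===== LEMMAS AND PROOFS =====

theorem infix_singleton_iff {α : Type} (a : α) (l : List α) : [a] <:+: l ↔ a ∈ l := by
  constructor
  · intro h; exact h.mem (List.mem_singleton_self a)
  · intro h
    obtain ⟨s, t, rfl⟩ := List.append_of_mem h
    exact ⟨s, t, by simp⟩

-- A's loop returns true iff every alphabet letter is 'w' or occurs in the lowered string
theorem esLipoLoop_eq_true_iff (cadena : String) (l : List Char) :
    esLipoLoop cadena l = true ↔ ∀ c ∈ l, c = 'w' ∨ c ∈ cadena.toList := by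
  induction l with
  | nil => simp [esLipoLoop]
  | cons letra rest ih =>
    by_cases hin : PySem.Str.isIn (String.ofList [letra]) cadena = true
    · have hmem : letra ∈ cadena.toList := by
        have := (PySem.Str.isIn_iff_infix (String.ofList [letra]) cadena).mp hin
        simpa [infix_singleton_iff] using this
      simp only [esLipoLoop, hin]
      simp [ih, hmem]
    · have hnmem : letra ∉ cadena.toList := by
        intro hm
        exact hin ((PySem.Str.isIn_iff_infix (String.ofList [letra]) cadena).mpr
          (by simpa [infix_singleton_iff] using hm))
      simp only [esLipoLoop, Bool.not_eq_true] at *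
      rw [hin]
      by_cases hw : letra = 'w'
      · simp [hw, ih, hw ▸ hnmem]
      · simp [hw, hnmem]

theorem testBit_maskStep (m : Nat) (c : Char) (i : Nat) :
    (maskStep m c).testBit i = (m.testBit i || decide (i < 26 ∧ c.toNat = 97 + i)) := by
  simp only [maskStep]
  split_ifs with h
  · rw [Nat.testBit_or, Nat.shiftLeft_eq, one_mul, Nat.testBit_two_pow]
    congr 1
    by_cases hi : c.toNat - 97 = i
    · simp [hi]; omega
    · simp [hi]; omega
  · have : ¬ (i < 26 ∧ c.toNat = 97 + i) := by omega
    simp [this]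

-- bit i of the accumulated mask is set iff it was set before or some letter with code 97+i (i < 26) was seen
theorem testBit_foldl_maskStep (l : List Char) (m i : Nat) :
    (l.foldl maskStep m).testBit i
      = (m.testBit i || l.any (fun c => decide (i < 26 ∧ c.toNat = 97 + i))) := by
  induction l generalizing m with
  | nil => simp
  | cons c rest ih =>
    simp only [List.foldl_cons, List.any_cons, ih, testBit_maskStep]
    rw [Bool.or_assoc]

theorem abcEx : ∀ i, i < 26 → ∃ c ∈ "abcdefghijklmnopqrstuvwxyz".toList, c.toNat = 97 + i := by
  intro i hi
  interval_cases i
  · exact ⟨'a', by decide, by decide⟩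
  · exact ⟨'b', by decide, by decide⟩
  · exact ⟨'c', by decide, by decide⟩
  · exact ⟨'d', by decide, by decide⟩
  · exact ⟨'e', by decide, by decide⟩
  · exact ⟨'f', by decide, by decide⟩
  · exact ⟨'g', by decide, by decide⟩
  · exact ⟨'h', by decide, by decide⟩
  · exact ⟨'i', by decide, by decide⟩
  · exact ⟨'j', by decide, by decide⟩
  · exact ⟨'k', by decide, by decide⟩
  · exact ⟨'l', by decide, by decide⟩
  · exact ⟨'m', by decide, by decide⟩
  · exact ⟨'n', by decide, by decide⟩
  · exact ⟨'o', by decide, by decide⟩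
  · exact ⟨'p', by decide, by decide⟩
  · exact ⟨'q', by decide, by decide⟩
  · exact ⟨'r', by decide, by decide⟩
  · exact ⟨'s', by decide, by decide⟩
  · exact ⟨'t', by decide, by decide⟩
  · exact ⟨'u', by decide, by decide⟩
  · exact ⟨'v', by decide, by decide⟩
  · exact ⟨'w', by decide, by decide⟩
  · exact ⟨'x', by decide, by decide⟩
  · exact ⟨'y', by decide, by decide⟩
  · exact ⟨'z', by decide, by decide⟩

theorem abcBound : ∀ c ∈ "abcdefghijklmnopqrstuvwxyz".toList, 97 ≤ c.toNat ∧ c.toNat ≤ 122 := by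
  intro c hc
  rw [show "abcdefghijklmnopqrstuvwxyz".toList = ['a','b','c','d','e','f','g','h','i','j','k','l','m','n','o','p','q','r','s','t','u','v','w','x','y','z'] from rfl] at hc
  fin_cases hc <;> exact ⟨by decide, by decide⟩

theorem eq_of_toNat_eq (c d : Char) (h : c.toNat = d.toNat) : c = d := by
  have := Char.ofNat_toNat c
  rw [h, Char.ofNat_toNat] at this
  exact this.symm

-- ===== VERDICT (by name: the statement is the Claim_ definition above) =====
theorem es_lipograma_spec : Claim_equal_es_lipograma := by
  intro cadena _
  unfold Spec_es_lipograma es_lipograma es_lipograma_alt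
  set low := PySem.Str.lower cadena with hlow
  rw [Bool.eq_iff_iff, esLipoLoop_eq_true_iff, beq_iff_eq]
  have h26 : (1 <<< 26 - 1 : Nat) = 2 ^ 26 - 1 := by decide
  constructor
  · intro hA
    apply Nat.eq_of_testBit_eq
    intro i
    rw [Nat.testBit_or, testBit_foldl_maskStep, Nat.zero_testBit, Bool.false_or,
      Nat.shiftLeft_eq, one_mul, Nat.testBit_two_pow, h26, Nat.testBit_two_pow_sub_one]
    by_cases hi : i < 26
    · obtain ⟨c, hc, hct⟩ := abcEx i hi
      rcases hA c hc with hw | hm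
      · have h22 : (22 : Nat) = i := by
          have hw119 : ('w').toNat = 119 := by decide
          rw [hw] at hct; omega
        simp [h22, hi]
      · simp only [hi, decide_true, Bool.or_eq_true, List.any_eq_true, decide_eq_true_eq]
        exact Or.inl ⟨c, hm, trivial, hct⟩
    · have h22 : ¬ ((22 : Nat) = i) := by omega
      simp [hi, h22]
  · intro hB c hc
    obtain ⟨h97, h122⟩ := abcBound c hc
    have hbit := congrArg (fun n => Nat.testBit n (c.toNat - 97)) hB
    simp only at hbit
    rw [Nat.testBit_or, testBit_foldl_maskStep, Nat.zero_testBit, Bool.false_or,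
      Nat.shiftLeft_eq, one_mul, Nat.testBit_two_pow, h26, Nat.testBit_two_pow_sub_one] at hbit
    have hlt : c.toNat - 97 < 26 := by omega
    rw [decide_eq_true hlt] at hbit
    rcases Bool.or_eq_true_iff.mp hbit with hany | h22
    · rw [List.any_eq_true] at hany
      obtain ⟨c', hc', hp⟩ := hany
      obtain ⟨-, hp2⟩ := of_decide_eq_true hp
      right
      have hcc : c' = c := eq_of_toNat_eq c' c (by omega)
      exact hcc ▸ hc'
    · left
      have h22' := of_decide_eq_true h22
      have hw119 : ('w').toNat = 119 := by decide
      exact eq_of_toNat_eq c 'w' (by omega)
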